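-- pv_equiv track=rewrite | github.com/abcde456/Culminating-One | caesar_utils.py | most_common_double_letter
-- ===== SOURCE A (Python) =====
-- alphabet = "ABCDEFGHIJKLMNOPQRSTUVWXYZ"
--
-- def most_common_double_letter(text: str) -> tuple[str, int] | None:
--     # Start with a counter of how many times this letter occured
--     # If another letter appears, set letter counter to 0
--     # If the same letter appears, set letter counter to 0, but set double
--     # letter count of that letter to +1
--
--     filteredText = text
--
--     for char in filteredText:
--         if char.upper() not in alphabet:
--             filteredText = filteredText.replace(char, "")
--
--     currentLetterCounter = 0
--     currentLetter = ""
--     letterTrackDict = {}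
--     for i, char in enumerate(filteredText):
--         if currentLetter == char:
--             currentLetterCounter += 1
--
--             if currentLetterCounter == 2:
--                 if not char in letterTrackDict:
--                     letterTrackDict[char] = 1
--                 else:
--                     letterTrackDict[char] += 1
--
--                 currentLetterCounter = 0
--         else:
--             currentLetter = char
--             currentLetterCounter = 1
--
--     currentHighestNum = 0
--     currentHighestChar = ""
--     for key, value in letterTrackDict.items():
--         if value > currentHighestNum:
--             currentHighestNum = value
--             currentHighestChar = key
--
--     if(currentHighestNum != 0):
--         return currentHighestChar + ", " + str(currentHighestNum)
--     else:
--         return "No double letters"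
-- ===== SOURCE B (Python) =====
-- alphabet = "ABCDEFGHIJKLMNOPQRSTUVWXYZ"
--
-- def most_common_double_letter(text: str) -> tuple[str, int] | None:
--     # Keep only alphabetic characters, then collapse the text into maximal
--     # runs of equal characters: each run of length L contributes L//2
--     # non-overlapping pairs to that letter's tally.
--     letters = [c for c in text if c.upper() in alphabet]
--     tally = {}
--     i, n = 0, len(letters)
--     while i < n:
--         j = i
--         while j < n and letters[j] == letters[i]:
--             j += 1
--         pairs = (j - i) // 2
--         if pairs:
--             tally[letters[i]] = tally.get(letters[i], 0) + pairs
--         i = j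
--     best = None
--     for ch, cnt in tally.items():
--         if best is None or cnt > best[1]:
--             best = (ch, cnt)
--     if best is None:
--         return "No double letters"
--     return f"{best[0]}, {best[1]}"
-- ===== Notes on version B (the rewrite author's own statement) =====
-- stated objective: alternative
-- what changed: Replaces A's per-character replace() filtering loop and incremental pair-counting state machine with a single filtering comprehension followed by run-length grouping (each maximal run of length L contributes L//2 pairs) into a tally dict, then a first-maximum scan.
import Mathlib
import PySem

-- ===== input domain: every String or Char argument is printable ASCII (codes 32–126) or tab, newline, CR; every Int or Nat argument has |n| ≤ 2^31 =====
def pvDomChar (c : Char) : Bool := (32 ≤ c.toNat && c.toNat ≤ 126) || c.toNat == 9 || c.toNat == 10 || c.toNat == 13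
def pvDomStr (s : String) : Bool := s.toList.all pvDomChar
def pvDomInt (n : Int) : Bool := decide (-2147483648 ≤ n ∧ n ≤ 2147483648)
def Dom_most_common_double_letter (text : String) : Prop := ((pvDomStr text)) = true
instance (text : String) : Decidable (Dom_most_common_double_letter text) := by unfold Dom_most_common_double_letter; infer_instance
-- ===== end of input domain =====

-- B re-implements A with one filtering pass and run-length grouping (each maximal run of
-- length L yields L//2 pairs) instead of A's per-character replace loop and incremental
-- pair-counting state machine; objective: simpler/alternative, same exact output.

-- ===== PORT A =====
-- module constant 'alphabet' (shared by both Pythons)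
def pvAlphabet : List Char := "ABCDEFGHIJKLMNOPQRSTUVWXYZ".toList

-- the body of A's second loop ('for i, char in enumerate(filteredText)')
def pvStepA (st : Int × List Char × PySem.Dict Char Int) (p : Int × Char) :
    Int × List Char × PySem.Dict Char Int :=
  let (currentLetterCounter, currentLetter, letterTrackDict) := st
  let char := p.2
  if currentLetter = [char] then
    let currentLetterCounter := currentLetterCounter + 1
    if currentLetterCounter = 2 then
      let letterTrackDict :=
        if ¬ letterTrackDict.contains char then letterTrackDict.insert char 1
        else letterTrackDict.insert char (letterTrackDict.getD char 0 + 1)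
      (0, currentLetter, letterTrackDict)
    else (currentLetterCounter, currentLetter, letterTrackDict)
  else (1, [char], letterTrackDict)

def most_common_double_letter (text : String) : String :=
  let filteredText := text.toList.foldl (fun ft char =>
      if PySem.Chars.isIn [PySem.Chars.upperChar char] pvAlphabet = false then
        PySem.Chars.replace ft [char] []
      else ft) text.toList
  let st := (PySem.List.enumerate filteredText 0).foldl pvStepA
    (0, ([] : List Char), (PySem.Dict.empty : PySem.Dict Char Int))
  let sel := st.2.2.items.foldl (fun (hi : Int × List Char) kv =>
      if kv.2 > hi.1 then (kv.2, [kv.1]) else hi) (0, ([] : List Char))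
  if sel.1 ≠ 0 then String.ofList (sel.2 ++ ", ".toList ++ PySem.Int.toChars sel.1)
  else "No double letters"

-- ===== PORT B =====
-- B's outer while loop over maximal runs (inner while = takeWhile/dropWhile split)
def pvRuns : List Char → PySem.Dict Char Int → PySem.Dict Char Int
  | [], tally => tally
  | c :: rest, tally =>
    let more := rest.takeWhile (fun x => x == c)
    let rest' := rest.dropWhile (fun x => x == c)
    let pairs := PySem.Int.floordiv (1 + (more.length : Int)) 2
    let tally := if pairs ≠ 0 then tally.insert c (tally.getD c 0 + pairs) else tally
    pvRuns rest' tally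
termination_by l _ => l.length
decreasing_by
  exact Nat.lt_succ_of_le (rest.length_dropWhile_le _)

-- B's 'best' selection loop ('best is None or cnt > best[1]')
def pvBest : List (Char × Int) → Option (Char × Int) → Option (Char × Int)
  | [], best => best
  | (ch, cnt) :: rest, best =>
    match best with
    | none => pvBest rest (some (ch, cnt))
    | some b => if cnt > b.2 then pvBest rest (some (ch, cnt)) else pvBest rest (some b)

def most_common_double_letter_alt (text : String) : String :=
  let letters := text.toList.filter
    (fun c => PySem.Chars.isIn [PySem.Chars.upperChar c] pvAlphabet)
  let tally := pvRuns letters PySem.Dict.empty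
  match pvBest tally.items none with
  | none => "No double letters"
  | some (ch, cnt) => String.ofList ([ch] ++ ", ".toList ++ PySem.Int.toChars cnt)

-- ===== PRECONDITION & SPEC =====
def Spec_most_common_double_letter (text : String) (out : String) : Prop := out = most_common_double_letter_alt text
instance (text : String) (out : String) : Decidable (Spec_most_common_double_letter text out) := by unfold Spec_most_common_double_letter; infer_instance

-- ===== CLAIM (what is proved, stated in full; the proofs are below) =====
def Claim_equal_most_common_double_letter : Prop := ∀ (text : String), Dom_most_common_double_letter text → Spec_most_common_double_letter text (most_common_double_letter text)

-- ===== LEMMAS AND PROOFS =====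

theorem pv_replace_go (c : Char) :
    ∀ (fuel : Nat) (l acc : List Char), l.length ≤ fuel →
      PySem.Chars.replace.go [c] [] fuel l acc = acc.reverse ++ l.filter (fun x => x ≠ c) := by
  intro fuel
  induction fuel with
  | zero =>
    intro l acc h
    have : l = [] := List.eq_nil_of_length_eq_zero (Nat.le_zero.mp h)
    subst this
    simp [PySem.Chars.replace.go]
  | succ n ih =>
    intro l acc h
    cases l with
    | nil => simp [PySem.Chars.replace.go]
    | cons x t =>
      by_cases hx : x = c
      · subst hx
        have hp : List.isPrefixOf [x] (x :: t) = true := by simp [List.isPrefixOf]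
        simp only [PySem.Chars.replace.go, hp, if_pos, List.length_cons,
          List.length_nil, List.drop_succ_cons, List.drop_zero, List.reverse_nil, List.nil_append]
        rw [ih t acc (by simpa using h)]
        simp
      · have hp : List.isPrefixOf [c] (x :: t) = false := by
          simp [List.isPrefixOf]; exact fun hc => (hx hc.symm).elim
        simp only [PySem.Chars.replace.go, hp]
        rw [if_neg (by simp), ih t (x :: acc) (by simpa using h)]
        simp [hx]

theorem pv_replace_single (l : List Char) (c : Char) :
    PySem.Chars.replace l [c] [] = l.filter (fun x => x ≠ c) := by
  have : PySem.Chars.replace l [c] [] = PySem.Chars.replace.go [c] [] l.length l [] := by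
    simp [PySem.Chars.replace]
  rw [this, pv_replace_go c l.length l [] le_rfl]
  simp

def pvKeep (c : Char) : Bool := PySem.Chars.isIn [PySem.Chars.upperChar c] pvAlphabet

theorem pv_filterA (l : List Char) :
    ∀ s : List Char,
      l.foldl (fun ft char =>
        if PySem.Chars.isIn [PySem.Chars.upperChar char] pvAlphabet = false then
          PySem.Chars.replace ft [char] []
        else ft) s
      = s.filter (fun x => pvKeep x || !(l.contains x)) := by
  induction l with
  | nil => intro s; simp
  | cons c l ih =>
    intro s
    simp only [List.foldl_cons]
    by_cases hc : pvKeep c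
    · rw [if_neg (by simp [pvKeep] at hc ⊢; simp [hc]), ih]
      apply List.filter_congr
      intro x hx
      by_cases hxc : x = c
      · subst hxc; simp [hc]
      · simp [hxc]
    · rw [if_pos (by simp [pvKeep] at hc ⊢; simp [hc]), pv_replace_single, ih, List.filter_filter]
      apply List.filter_congr
      intro x hx
      by_cases hxc : x = c
      · subst hxc
        simp [hc]
      · simp [hxc]

theorem pv_foldl_enumerate (xs : List Char) :
    ∀ (s : Int) (init : Int × List Char × PySem.Dict Char Int),
      (PySem.List.enumerate xs s).foldl pvStepA init
        = xs.foldl (fun st c => pvStepA st (0, c)) init := by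
  induction xs with
  | nil => intro s init; simp [PySem.List.enumerate_nil]
  | cons x xs ih =>
    intro s init
    rw [PySem.List.enumerate_cons, List.foldl_cons, List.foldl_cons, ih]
    congr 1

theorem pv_incr (d : PySem.Dict Char Int) (c : Char) :
    (if ¬ d.contains c then d.insert c 1 else d.insert c (d.getD c 0 + 1))
      = d.insert c (d.getD c 0 + 1) := by
  by_cases hc : PySem.Dict.contains d c
  · simp [hc]
  · rw [if_pos (by simp [hc]), PySem.Dict.getD_of_not_contains d 0 (by simpa using hc)]
    norm_num

theorem pv_run_consume (c : Char) :
    ∀ (k : Nat) (d : PySem.Dict Char Int),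
      (List.replicate k c).foldl (fun st x => pvStepA st (0, x)) (1, [c], d)
        = ((if k % 2 = 0 then 1 else 0), [c],
           if (((k + 1) / 2 : Nat) : Int) ≠ 0 then
             d.insert c (d.getD c 0 + (((k + 1) / 2 : Nat) : Int))
           else d) := by
  intro k
  induction k using Nat.twoStepInduction with
  | zero => intro d; simp
  | one =>
    intro d
    simp only [List.replicate, List.foldl_cons, List.foldl_nil, pvStepA]
    norm_num
    intro hc
    rw [PySem.Dict.getD_of_not_contains d 0 (by simpa using hc)]
    congr 1
  | more k ih ih2 =>
    intro d
    have hrep : List.replicate (k + 2) c = c :: c :: List.replicate k c := by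
      simp [List.replicate]
    rw [hrep, List.foldl_cons, List.foldl_cons]
    have s1 : pvStepA (1, [c], d) (0, c)
        = (0, [c], if ¬ d.contains c then d.insert c 1 else d.insert c (d.getD c 0 + 1)) := by
      simp [pvStepA]
    have s2 : pvStepA (0, [c], d.insert c (d.getD c 0 + 1)) (0, c)
        = (1, [c], d.insert c (d.getD c 0 + 1)) := by
      simp [pvStepA]
    rw [s1, pv_incr, s2, ih]
    have hmod : (k + 2) % 2 = k % 2 := by omega
    have hdiv : (k + 2 + 1) / 2 = (k + 1) / 2 + 1 := by omega
    rw [hmod, hdiv]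
    by_cases hz : ((k + 1) / 2 : Nat) = 0
    · have hk : k = 0 := by omega
      subst hk
      norm_num [PySem.Dict.getD_insert_self]
    · have hz2 : (((k + 1) / 2 : Nat) : Int) ≠ 0 := by exact_mod_cast hz
      have hzz : ((((k + 1) / 2 + 1 : Nat)) : Int) ≠ 0 := by
        exact_mod_cast (by omega : ((k + 1) / 2 + 1 : Nat) ≠ 0)
      rw [if_pos hz2, if_pos hzz, PySem.Dict.getD_insert_self, PySem.Dict.insert_insert_self]
      congr 2
      rw [Nat.cast_add, Nat.cast_one, add_assoc, add_comm 1]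

theorem pv_dropWhile_head (l : List Char) (p : Char → Bool) (h : Char)
    (hh : (l.dropWhile p).head? = some h) : p h = false := by
  induction l with
  | nil => simp [List.dropWhile] at hh
  | cons x t ih =>
    rw [List.dropWhile_cons] at hh
    by_cases hp : p x
    · simp [hp] at hh; exact ih hh
    · simp [hp] at hh; subst hh; simp [hp]

theorem pv_machine :
    ∀ (l : List Char) (d : PySem.Dict Char Int) (cnt : Int) (cur : List Char),
      (∀ h, l.head? = some h → cur ≠ [h]) →
      (l.foldl (fun st c => pvStepA st (0, c)) (cnt, cur, d)).2.2 = pvRuns l d := by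
  intro l d
  induction l, d using pvRuns.induct with
  | case1 d => intro cnt cur _; simp [pvRuns]
  | case2 c rest d more rest' pairs tally ih =>
    intro cnt cur hcur
    have hmore : more = List.replicate more.length c := by
      apply List.eq_replicate_of_mem
      intro b hb
      have := List.mem_takeWhile_imp hb
      simp at this
      exact this
    have hsplit : c :: rest = (c :: more) ++ rest' := by
      have := (List.takeWhile_append_dropWhile (p := fun x => x == c) (l := rest)).symm
      simp only [more, rest']
      exact congrArg (c :: ·) this
    have hrhs : pvRuns (c :: rest) d = pvRuns rest' tally := by
      rw [pvRuns]; simp only [more, rest', pairs, tally, dite_eq_ite]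
    rw [hrhs]
    conv_lhs => rw [hsplit]
    rw [List.foldl_append, List.foldl_cons]
    have hstep : pvStepA (cnt, cur, d) (0, c) = (1, [c], d) := by
      have : ¬ (cur = [c]) := hcur c rfl
      simp [pvStepA, this]
    rw [hstep]
    conv_lhs => rw [hmore]
    rw [pv_run_consume]
    have hpairs : pairs = (((more.length + 1) / 2 : Nat) : Int) := by
      show PySem.Int.floordiv (1 + (more.length : Int)) 2 = _
      rw [show (1 : Int) + (more.length : Int) = ((more.length + 1 : Nat) : Int) by push_cast; omega,
        show (2 : Int) = ((2 : Nat) : Int) from rfl, PySem.Int.floordiv_natCast]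
    have htally : (if (((more.length + 1) / 2 : Nat) : Int) ≠ 0 then
        d.insert c (d.getD c 0 + (((more.length + 1) / 2 : Nat) : Int)) else d) = tally := by
      simp only [tally, hpairs, dite_eq_ite]
    rw [htally]
    apply ih
    intro h hh
    have := pv_dropWhile_head rest (fun x => x == c) h hh
    simp at this
    intro hc
    exact this (by injection hc with h1 _; exact h1.symm) |>.elim

theorem pv_vals_pos :
    ∀ (l : List Char) (d : PySem.Dict Char Int),
      (∀ p ∈ d.items, 1 ≤ p.2) → ∀ p ∈ (pvRuns l d).items, 1 ≤ p.2 := by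
  intro l d
  induction l, d using pvRuns.induct with
  | case1 d => intro h; simpa [pvRuns] using h
  | case2 c rest d more rest' pairs tally ih =>
    intro hd
    have hrw : pvRuns (c :: rest) d = pvRuns rest' tally := by
      rw [pvRuns]; simp only [more, rest', pairs, tally, dite_eq_ite]
    rw [hrw]
    apply ih
    intro p hp
    simp only [tally] at hp
    by_cases hz : pairs ≠ 0
    · rw [dif_pos hz] at hp
      rcases (PySem.Dict.mem_items_insert _ _ _ _).mp hp with h1 | h2
      · subst h1
        have hp0 : (0 : Int) ≤ pairs := by
          simp only [pairs]
          rw [show (1 : Int) + (more.length : Int) = ((more.length + 1 : Nat) : Int) by push_cast; omega,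
            show (2 : Int) = ((2 : Nat) : Int) from rfl, PySem.Int.floordiv_natCast]
          exact Int.natCast_nonneg _
        have hg : (0 : Int) ≤ d.getD c 0 := by
          rw [PySem.Dict.getD_eq_get?_getD]
          cases hq : d.get? c with
          | none => simp
          | some v =>
            have := hd _ (PySem.Dict.mem_items_of_get?_eq_some (h := hq))
            simpa using le_trans (by norm_num) this
        simp only
        omega
      · exact hd _ h2.1
    · rw [dif_neg hz] at hp
      exact hd _ hp

theorem pv_sel (items : List (Char × Int)) :
    ∀ (c : Char) (b : Int), ∃ c' b', b ≤ b' ∧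
      pvBest items (some (c, b)) = some (c', b') ∧
      items.foldl (fun (hi : Int × List Char) kv =>
        if kv.2 > hi.1 then (kv.2, [kv.1]) else hi) (b, [c]) = (b', [c']) := by
  induction items with
  | nil => intro c b; exact ⟨c, b, le_rfl, rfl, rfl⟩
  | cons kv rest ih =>
    intro c b
    obtain ⟨k, v⟩ := kv
    by_cases hv : v > b
    · obtain ⟨c', b', hle, h1, h2⟩ := ih k v
      exact ⟨c', b', le_trans (le_of_lt hv) hle, by simpa [pvBest, hv] using h1,
        by simpa [hv] using h2⟩
    · obtain ⟨c', b', hle, h1, h2⟩ := ih c b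
      exact ⟨c', b', hle, by simpa [pvBest, hv] using h1, by simpa [hv] using h2⟩

-- ===== VERDICT (by name: the statement is the Claim_ definition above) =====
theorem most_common_double_letter_spec : Claim_equal_most_common_double_letter := by
  intro text _
  unfold Spec_most_common_double_letter most_common_double_letter most_common_double_letter_alt
  dsimp only
  have hfil : text.toList.foldl (fun ft char =>
      if PySem.Chars.isIn [PySem.Chars.upperChar char] pvAlphabet = false then
        PySem.Chars.replace ft [char] []
      else ft) text.toList
      = text.toList.filter (fun c => PySem.Chars.isIn [PySem.Chars.upperChar c] pvAlphabet) := by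
    rw [pv_filterA]
    apply List.filter_congr
    intro x hx
    simp [pvKeep, hx]
  rw [hfil, pv_foldl_enumerate, pv_machine _ _ _ _ (by intro h _ hc; cases hc)]
  have hpos := pv_vals_pos (text.toList.filter (fun c => PySem.Chars.isIn [PySem.Chars.upperChar c] pvAlphabet))
    PySem.Dict.empty (by intro p hp; simp [PySem.Dict.empty] at hp)
  cases hitems : (pvRuns (text.toList.filter (fun c => PySem.Chars.isIn [PySem.Chars.upperChar c] pvAlphabet)) PySem.Dict.empty).items with
  | nil => simp [pvBest]
  | cons kv t =>
    obtain ⟨k, v⟩ := kv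
    have hv : 1 ≤ v := by
      have := hpos (k, v) (by rw [hitems]; exact List.mem_cons_self)
      simpa using this
    obtain ⟨c', b', hle, h1, h2⟩ := pv_sel t k v
    rw [List.foldl_cons]
    have hstep0 : (if v > (0 : Int) then (v, [k]) else ((0 : Int), ([] : List Char))) = (v, [k]) := by
      rw [if_pos (by omega)]
    simp only [hstep0, h2]
    have hB : pvBest ((k, v) :: t) none = some (c', b') := by
      simpa [pvBest] using h1
    rw [hB]
    rw [if_pos (by show b' ≠ 0; omega)]
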